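-- pv_equiv track=rewrite | github.com/JhunJ/PileXY | backend/excel_compare.py | _resolve_column_name
-- ===== SOURCE A (Python) =====
-- from typing import Any, Dict, Iterable, List, Optional, Sequence, Tuple
--
-- def _resolve_column_name(columns: Sequence[str], spec: Optional[str]) -> Optional[str]:
--     token = str(spec or "").strip()
--     if not token:
--         return None
--     lowered = token.lower()
--     for column in columns:
--         if str(column).strip() == token:
--             return str(column)
--     for column in columns:
--         if str(column).strip().lower() == lowered:
--             return str(column)
--     if token.isalpha():
--         column_index = 0
--         for ch in token.upper():
--             column_index = column_index * 26 + (ord(ch) - 64)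
--         column_index -= 1
--         if 0 <= column_index < len(columns):
--             return str(columns[column_index])
--     return None
-- ===== SOURCE B (Python) =====
-- def _resolve_column_name(columns, spec):
--     token = str(spec or "").strip()
--     if not token:
--         return None
--     lowered = token.lower()
--     # single pass: return at once on an exact stripped match, remember the
--     # first case-insensitive candidate for after the scan
--     ci_hit = None
--     for column in columns:
--         name = str(column)
--         stripped = name.strip()
--         if stripped == token:
--             return name
--         if ci_hit is None and stripped.lower() == lowered:
--             ci_hit = name
--     if ci_hit is not None:
--         return ci_hit
--     if token.isalpha():
--         index, weight = 0, 1
--         for ch in reversed(token.upper()):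
--             index += (ord(ch) - 64) * weight
--             weight *= 26
--         index -= 1
--         if 0 <= index < len(columns):
--             return str(columns[index])
--     return None
-- ===== Notes on version B (the rewrite author's own statement) =====
-- stated objective: alternative
-- what changed: A single pass over columns with an early return on exact match and a first-case-insensitive-candidate accumulator replaces A's two staged scans, and the Excel-letter fallback scans the letters back-to-front with a running weight instead of front-to-back Horner accumulation.
import Mathlib
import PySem

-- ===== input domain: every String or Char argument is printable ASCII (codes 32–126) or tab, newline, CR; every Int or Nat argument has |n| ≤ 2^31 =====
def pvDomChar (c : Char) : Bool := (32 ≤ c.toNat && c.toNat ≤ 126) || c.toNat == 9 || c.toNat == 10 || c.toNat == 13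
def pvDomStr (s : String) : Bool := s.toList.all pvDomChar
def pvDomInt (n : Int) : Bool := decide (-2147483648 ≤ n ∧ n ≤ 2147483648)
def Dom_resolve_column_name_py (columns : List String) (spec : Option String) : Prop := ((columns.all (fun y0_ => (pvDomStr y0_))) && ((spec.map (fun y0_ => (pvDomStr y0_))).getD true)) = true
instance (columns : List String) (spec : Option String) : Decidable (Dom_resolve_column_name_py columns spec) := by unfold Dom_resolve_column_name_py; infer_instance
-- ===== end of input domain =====

-- B resolves in ONE pass (early return on exact match, first case-insensitive candidate accumulated)
-- instead of A's two staged scans, and computes the Excel-letter fallback as a back-to-front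
-- running-weight base-26 scan instead of Horner accumulation; alternative structure, same cost.

-- ===== PORT A =====
def resolve_column_name_py (columns : List String) (spec : Option String) : Option String :=
  let token := PySem.Str.strip (spec.getD "")
  if token = "" then none
  else
    let lowered := PySem.Str.lower token
    match columns.find? (fun c => PySem.Str.strip c == token) with
    | some c => some c
    | none =>
      match columns.find? (fun c => PySem.Str.lower (PySem.Str.strip c) == lowered) with
      | some c => some c
      | none =>
        if PySem.Str.strIsalpha token then
          let ci := ((PySem.Str.upper token).toList.foldl
              (fun acc ch => acc * 26 + ((ch.toNat : Int) - 64)) 0) - 1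
          if 0 ≤ ci ∧ ci < (columns.length : Int) then PySem.List.pyGet? columns ci else none
        else none

-- ===== PORT B =====
-- the single scan: early return on exact stripped match, else carry the first ci candidate
def pvScan (token lowered : String) (cols : List String) (ciHit : Option String) : Option String :=
  match cols with
  | [] => ciHit
  | c :: cs =>
    let stripped := PySem.Str.strip c
    if stripped = token then some c
    else pvScan token lowered cs
      (if ciHit = none ∧ PySem.Str.lower stripped = lowered then some c else ciHit)

def resolve_column_name_py_alt (columns : List String) (spec : Option String) : Option String :=
  let token := PySem.Str.strip (spec.getD "")
  if token = "" then none
  else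
    let lowered := PySem.Str.lower token
    match pvScan token lowered columns none with
    | some c => some c
    | none =>
      if PySem.Str.strIsalpha token then
        let st := (PySem.Str.upper token).toList.reverse.foldl
            (fun (st : Int × Int) ch => (st.1 + ((ch.toNat : Int) - 64) * st.2, st.2 * 26)) (0, 1)
        let index := st.1 - 1
        if 0 ≤ index ∧ index < (columns.length : Int) then PySem.List.pyGet? columns index else none
      else none

-- ===== PRECONDITION & SPEC =====
def Spec_resolve_column_name_py (columns : List String) (spec : Option String) (out : Option String) : Prop := out = resolve_column_name_py_alt columns spec
instance (columns : List String) (spec : Option String) (out : Option String) : Decidable (Spec_resolve_column_name_py columns spec out) := by unfold Spec_resolve_column_name_py; infer_instance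

-- ===== CLAIM (what is proved, stated in full; the proofs are below) =====
def Claim_equal_resolve_column_name_py : Prop := ∀ (columns : List String) (spec : Option String), Dom_resolve_column_name_py columns spec → Spec_resolve_column_name_py columns spec (resolve_column_name_py columns spec)

-- ===== LEMMAS AND PROOFS =====

-- the single scan computes: first exact match, else the accumulator, else the first ci match
theorem pvScan_eq (token lowered : String) (cols : List String) (acc : Option String) :
    pvScan token lowered cols acc
      = match cols.find? (fun c => PySem.Str.strip c == token) with
        | some c => some c
        | none => acc.or (cols.find? (fun c => PySem.Str.lower (PySem.Str.strip c) == lowered)) := by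
  induction cols generalizing acc with
  | nil => cases acc <;> simp [pvScan]
  | cons c cs ih =>
    simp only [pvScan, List.find?]
    by_cases h : PySem.Str.strip c = token
    · simp [h]
    · have hb : (PySem.Str.strip c == token) = false := by simp [h]
      simp only [h, if_false, hb, ih]
      by_cases h2 : PySem.Str.lower (PySem.Str.strip c) = lowered
      · have hb2 : (PySem.Str.lower (PySem.Str.strip c) == lowered) = true := by simp [h2]
        cases acc <;> simp [h2]
      · have hb2 : (PySem.Str.lower (PySem.Str.strip c) == lowered) = false := by simp [h2]
        cases acc <;> simp [hb2, h2]

-- Horner with seed a equals a·26^len plus Horner from 0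
theorem horner_seed (l : List Char) (a : Int) :
    l.foldl (fun acc ch => acc * 26 + ((ch.toNat : Int) - 64)) a
      = a * 26 ^ l.length + l.foldl (fun acc ch => acc * 26 + ((ch.toNat : Int) - 64)) 0 := by
  induction l generalizing a with
  | nil => simp
  | cons c cs ih =>
    simp only [List.foldl, List.length_cons]
    rw [ih (a * 26 + ((c.toNat : Int) - 64)), ih ((0 : Int) * 26 + ((c.toNat : Int) - 64))]
    ring

-- little-endian base-26 value of a char list
def pvLE : List Char → Int
  | [] => 0
  | c :: t => ((c.toNat : Int) - 64) + 26 * pvLE t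

-- the running-weight pair fold computes (s + p·LE, p·26^len)
theorem pair_foldl (m : List Char) (s p : Int) :
    m.foldl (fun (st : Int × Int) ch => (st.1 + ((ch.toNat : Int) - 64) * st.2, st.2 * 26)) (s, p)
      = (s + p * pvLE m, p * 26 ^ m.length) := by
  induction m generalizing s p with
  | nil => simp [pvLE]
  | cons c t ih =>
    simp only [List.foldl_cons, ih, pvLE, List.length_cons, Prod.mk.injEq]
    constructor <;> ring

theorem pvLE_append_singleton (xs : List Char) (c : Char) :
    pvLE (xs ++ [c]) = pvLE xs + 26 ^ xs.length * ((c.toNat : Int) - 64) := by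
  induction xs with
  | nil => simp [pvLE]
  | cons x t ih =>
    simp only [List.cons_append, pvLE, ih, List.length_cons]
    ring

-- LE of the reversed string equals Horner accumulation over the string
theorem pvLE_reverse (l : List Char) :
    pvLE l.reverse = l.foldl (fun acc ch => acc * 26 + ((ch.toNat : Int) - 64)) 0 := by
  induction l with
  | nil => rfl
  | cons c cs ih =>
    rw [List.reverse_cons, pvLE_append_singleton, ih]
    simp only [List.foldl_cons, List.length_reverse]
    conv_rhs => rw [horner_seed cs]
    ring

-- the running-weight scan over the reversed string equals Horner accumulation
theorem rev_pair_eq_horner (l : List Char) :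
    (l.reverse.foldl (fun (st : Int × Int) ch =>
        (st.1 + ((ch.toNat : Int) - 64) * st.2, st.2 * 26)) (0, 1)).1
      = l.foldl (fun acc ch => acc * 26 + ((ch.toNat : Int) - 64)) 0 := by
  rw [pair_foldl, ← pvLE_reverse]
  simp

-- ===== VERDICT (by name: the statement is the Claim_ definition above) =====
theorem resolve_column_name_py_spec : Claim_equal_resolve_column_name_py := by
  intro columns spec _
  unfold Spec_resolve_column_name_py resolve_column_name_py resolve_column_name_py_alt
  by_cases h : PySem.Str.strip (spec.getD "") = ""
  · simp [h]
  · simp only [h, if_false, pvScan_eq]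
    cases h1 : columns.find? (fun c => PySem.Str.strip c == PySem.Str.strip (spec.getD "")) with
    | some c => rfl
    | none =>
      cases h2 : columns.find? (fun c =>
          PySem.Str.lower (PySem.Str.strip c) == PySem.Str.lower (PySem.Str.strip (spec.getD ""))) with
      | some c => rfl
      | none => simp only [rev_pair_eq_horner, Option.or]
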